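-- pv_equiv track=rewrite | github.com/xapatjb4/AlgoDataStruct | python/IkAlgs/arrays/flipFlop.py | flipFlop
-- ===== SOURCE A (Python) =====
-- def flipFlop(A):
--     B = A.copy()
--     B.sort()
--     l = 0
--     r = len(B)-1
--     ans = []
--     x = 0
--     while x <= (len(B) - 1) // 2:  # 12345 #bug, math error
--         ans.append(B[x])
--         end = len(B) - 1 - x
--         if end != x:
--             ans.append(B[end])
--         x += 1
--     # we could have a check for validity
--     return ans
-- ===== SOURCE B (Python) =====
-- def flipFlop(A):
--     B = sorted(A)
--     m = (len(B) + 1) // 2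
--     lows = B[:m]
--     highs = B[m:][::-1]
--     ans = []
--     for lo, hi in zip(lows, highs):
--         ans.append(lo)
--         ans.append(hi)
--     if len(lows) > len(highs):
--         ans.append(lows[-1])
--     return ans
-- ===== Notes on version B (the rewrite author's own statement) =====
-- stated objective: simpler
-- what changed: Replaces the mirror-index while-loop (appending B[x] and B[len-1-x] with an equal-index guard) by a partition-and-interleave: split the sorted list into a low half and a reversed high half, zip them, and append the odd middle once at the end.
import Mathlib
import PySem

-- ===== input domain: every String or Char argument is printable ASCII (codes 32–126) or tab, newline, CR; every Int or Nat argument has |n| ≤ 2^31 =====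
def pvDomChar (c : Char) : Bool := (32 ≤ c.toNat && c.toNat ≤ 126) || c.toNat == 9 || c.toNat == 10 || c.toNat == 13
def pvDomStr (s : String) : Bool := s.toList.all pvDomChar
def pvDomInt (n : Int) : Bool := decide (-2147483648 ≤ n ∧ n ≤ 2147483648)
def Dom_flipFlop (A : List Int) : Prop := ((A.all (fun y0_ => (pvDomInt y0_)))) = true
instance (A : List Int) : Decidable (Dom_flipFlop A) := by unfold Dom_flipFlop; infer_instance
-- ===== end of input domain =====

-- B replaces A's mirror-index while-loop by partitioning the sorted list into a low half and a
-- reversed high half and interleaving them (odd middle appended once); objective: simpler.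

-- ===== PORT A =====
-- the while loop of A, running on the sorted copy B, as structural recursion on the counter x
def flipFlopLoop (B : List Int) (x : Nat) : List Int :=
  if _h : (x : Int) ≤ PySem.Int.floordiv (PySem.List.len B - 1) 2 then
    PySem.List.pyGetD B (x : Int) 0 ::
      ((if PySem.List.len B - 1 - (x : Int) ≠ (x : Int) then
          [PySem.List.pyGetD B (PySem.List.len B - 1 - (x : Int)) 0] else []) ++
        flipFlopLoop B (x + 1))
  else []
termination_by ((PySem.Int.floordiv (PySem.List.len B - 1) 2 + 1) - (x : Int)).toNat
decreasing_by omega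

def flipFlop (A : List Int) : List Int :=
  flipFlopLoop (PySem.List.sorted A (fun v => v) false) 0

-- ===== PORT B =====
def flipFlop_alt (A : List Int) : List Int :=
  let B := PySem.List.sorted A (fun v => v) false
  let m := PySem.Int.floordiv (PySem.List.len B + 1) 2
  let lows := PySem.List.slice B none (some m)
  let highs := (PySem.List.slice B (some m) none).reverse
  let ans := (lows.zip highs).foldl (fun acc p => acc ++ [p.1, p.2]) []
  if highs.length < lows.length then ans ++ [PySem.List.pyGetD lows (-1) 0] else ans

-- ===== PRECONDITION & SPEC =====
def Spec_flipFlop (A : List Int) (out : List Int) : Prop := out = flipFlop_alt A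
instance (A : List Int) (out : List Int) : Decidable (Spec_flipFlop A out) := by unfold Spec_flipFlop; infer_instance

-- ===== CLAIM (what is proved, stated in full; the proofs are below) =====
def Claim_equal_flipFlop : Prop := ∀ (A : List Int), Dom_flipFlop A → Spec_flipFlop A (flipFlop A)

-- ===== LEMMAS AND PROOFS =====

-- the common characterisation: pairs (L[i], L[n-1-i]) for i < n/2, then the odd middle element
def ffWeave (L : List Int) : List Int :=
  (List.range' 0 (L.length / 2)).flatMap (fun i => [L.getD i 0, L.getD (L.length - 1 - i) 0]) ++
    (if L.length % 2 = 1 then [L.getD (L.length / 2) 0] else [])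

lemma ffCond (n x : Nat) :
    ((x:Int) ≤ PySem.Int.floordiv ((n:Int) - 1) 2) ↔ (1 ≤ n ∧ x ≤ (n-1)/2) := by
  cases n with
  | zero =>
    have h : PySem.Int.floordiv ((0:Nat) - 1) 2 = -1 := by decide
    rw [h]; omega
  | succ m =>
    have h : ((m+1:Nat):Int) - 1 = ((m:Nat):Int) := by push_cast; ring
    have h2 : PySem.Int.floordiv ((m:Nat):Int) 2 = ((m/2 : Nat):Int) := by
      exact_mod_cast PySem.Int.floordiv_natCast m 2
    rw [h, h2]
    omega

lemma flipFlopLoop_eq (L : List Int) (x : Nat) :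
    flipFlopLoop L x =
      (List.range' x (L.length / 2 - x)).flatMap
        (fun i => [L.getD i 0, L.getD (L.length - 1 - i) 0]) ++
      (if L.length % 2 = 1 ∧ x ≤ L.length / 2 then [L.getD (L.length / 2) 0] else []) := by
  induction x using flipFlopLoop.induct L with
  | case1 x hx ih =>
    set n := L.length with hn
    rw [flipFlopLoop, dif_pos hx]
    rw [PySem.List.len_eq] at hx
    rw [ffCond] at hx
    obtain ⟨hn1, hxk⟩ := hx
    have hend : PySem.List.len L - 1 - (x:Int) = ((n - 1 - x : Nat) : Int) := by
      rw [PySem.List.len_eq]; omega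
    rw [hend]
    by_cases hne : n - 1 - x ≠ x
    · have hxlt : x < n / 2 := by omega
      rw [if_pos (by exact_mod_cast hne), ih]
      have hr : n / 2 - x = (n / 2 - (x + 1)) + 1 := by omega
      rw [hr, List.range'_succ]
      have hc1 : (n % 2 = 1 ∧ x ≤ n / 2) ↔ (n % 2 = 1 ∧ x + 1 ≤ n / 2) := by omega
      simp only [hc1, List.flatMap_cons, List.cons_append, List.nil_append, PySem.List.pyGetD_natCast]
    · rw [not_not] at hne
      rw [if_neg (by simp [hne]), ih]
      have h1 : n / 2 - (x + 1) = 0 := by omega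
      have h2 : ¬ (n % 2 = 1 ∧ x + 1 ≤ n / 2) := by omega
      have h3 : n / 2 - x = 0 := by omega
      have h4 : n % 2 = 1 ∧ x ≤ n / 2 := by omega
      have h5 : n / 2 = x := by omega
      simp [h5, PySem.List.pyGetD_natCast]
      exact h4.1
  | case2 x hx =>
    rw [flipFlopLoop, dif_neg hx]
    rw [PySem.List.len_eq, ffCond] at hx
    have h1 : L.length / 2 - x = 0 := by omega
    have h2 : ¬ (L.length % 2 = 1 ∧ x ≤ L.length / 2) := by omega
    rw [h1, if_neg h2]; simp

lemma flipFlop_eq_weave (A : List Int) :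
    flipFlop A = ffWeave (PySem.List.sorted A (fun v => v) false) := by
  unfold flipFlop ffWeave
  rw [flipFlopLoop_eq]
  simp

lemma ffZip (L : List Int) :
    (L.take ((L.length + 1) / 2)).zip ((L.drop ((L.length + 1) / 2)).reverse) =
      (List.range' 0 (L.length / 2)).map (fun i => (L.getD i 0, L.getD (L.length - 1 - i) 0)) := by
  set n := L.length with hn
  set m := (n + 1) / 2 with hm
  apply List.ext_getElem
  · simp [hn]; omega
  · intro i h1 h2
    have hi : i < n / 2 := by simp at h2; omega
    have him : m + (n - m - 1 - i) < n := by omega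
    simp only [List.getElem_zip, List.getElem_map, List.getElem_range', List.getElem_take,
      List.getElem_reverse, List.getElem_drop, List.length_drop]
    have e1 : L.getD (0 + 1 * i) 0 = L[i]'(by omega) := by
      rw [List.getD_eq_getElem L 0 (show 0 + 1 * i < L.length by omega)]
      congr 1; omega
    have e2 : L.getD (n - 1 - (0 + 1 * i)) 0 = L[m + (n - m - 1 - i)]'him := by
      rw [List.getD_eq_getElem L 0 (show n - 1 - (0 + 1 * i) < L.length by omega)]
      congr 1; omega
    rw [← hn] at *
    exact Prod.ext (by rw [e1]) (by rw [e2])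

lemma flipFlop_alt_eq_weave (A : List Int) :
    flipFlop_alt A = ffWeave (PySem.List.sorted A (fun v => v) false) := by
  unfold flipFlop_alt
  set L := PySem.List.sorted A (fun v => v) false with hL
  set n := L.length with hn
  have hm : PySem.Int.floordiv (PySem.List.len L + 1) 2 = (((n + 1) / 2 : Nat) : Int) := by
    rw [PySem.List.len_eq, ← hn]
    have h1 : (n : Int) + 1 = ((n + 1 : Nat) : Int) := by push_cast; ring
    rw [h1]
    exact_mod_cast PySem.Int.floordiv_natCast (n + 1) 2
  simp only [hm, PySem.List.slice_to_natCast, PySem.List.slice_from_natCast]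
  rw [PySem.List.foldl_append_eq_flatMap, ffZip, List.flatMap_map]
  have hlow : (L.take ((n + 1) / 2)).length = (n + 1) / 2 := by
    rw [List.length_take]; omega
  have hhigh : ((L.drop ((n + 1) / 2)).reverse).length = n - (n + 1) / 2 := by
    simp [← hn]
  unfold ffWeave
  rw [← hn, hlow, hhigh]
  by_cases hodd : n % 2 = 1
  · rw [if_pos (by omega), if_pos hodd]
    have hne : L.take ((n + 1) / 2) ≠ [] := by
      intro h; have := congrArg List.length h; rw [hlow] at this; simp at this; omega
    rw [PySem.List.pyGetD_neg_one _ _ hne, List.getLast_eq_getElem]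
    congr 1
    simp only [List.getElem_take, hlow]
    rw [List.getD_eq_getElem L 0 (show n / 2 < L.length by omega)]
    simp only [show (n + 1) / 2 - 1 = n / 2 from by omega]
  · rw [if_neg (by omega), if_neg hodd]
    simp

-- ===== VERDICT (by name: the statement is the Claim_ definition above) =====
theorem flipFlop_spec : Claim_equal_flipFlop := by
  intro A _
  unfold Spec_flipFlop
  rw [flipFlop_eq_weave, flipFlop_alt_eq_weave]
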